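-- pv_equiv track=rewrite | github.com/jordanngo205/Basketball-Tracker | backend/streamlit_app.py | count_paint_touch_three_make_streaks
-- ===== SOURCE A (Python) =====
-- def count_paint_touch_three_make_streaks(possessions: list[dict]) -> int:
--     streak = 0
--     total = 0
--     for possession in possessions:
--         made = possession.get("paint_touch") and (possession.get("points") or 0) > 0
--         if made:
--             streak += 1
--             if streak == 3:
--                 total += 1
--             elif streak > 3:
--                 # Count every run of 3+ as a single streak.
--                 continue
--         else:
--             streak = 0
--     return total
-- ===== SOURCE B (Python) =====
-- def count_paint_touch_three_make_streaks(possessions: list[dict]) -> int: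
--     q = [bool(p.get("paint_touch") and (p.get("points") or 0) > 0) for p in possessions]
--     return sum(
--         1
--         for i in range(len(q) - 2)
--         if q[i] and q[i + 1] and q[i + 2] and (i == 0 or not q[i - 1])
--     )
-- ===== Notes on version B (the rewrite author's own statement) =====
-- stated objective: alternative
-- what changed: Dropped the incremental streak counter entirely: B maps possessions to a qualifying boolean list and then counts indices that start a run of length >= 3, via a fixed width-3 window test plus a left-neighbour boundary check (q[i..i+2] all true and (i==0 or not q[i-1])).
import Mathlib
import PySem

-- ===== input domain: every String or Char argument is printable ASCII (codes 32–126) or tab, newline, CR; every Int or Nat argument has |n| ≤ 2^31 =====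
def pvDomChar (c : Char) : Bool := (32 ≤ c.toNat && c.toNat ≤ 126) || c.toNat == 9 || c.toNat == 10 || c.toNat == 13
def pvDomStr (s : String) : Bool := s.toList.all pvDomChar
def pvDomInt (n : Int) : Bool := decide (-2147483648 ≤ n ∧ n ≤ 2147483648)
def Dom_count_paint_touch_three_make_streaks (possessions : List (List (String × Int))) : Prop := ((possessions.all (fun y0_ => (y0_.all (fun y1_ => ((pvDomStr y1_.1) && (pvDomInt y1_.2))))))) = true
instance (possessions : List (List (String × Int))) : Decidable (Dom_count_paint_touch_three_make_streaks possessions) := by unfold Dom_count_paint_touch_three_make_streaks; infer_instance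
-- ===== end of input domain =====

-- B drops A's incremental streak counter: it counts the indices that START a
-- run of >= 3 qualifying possessions, by a width-3 window + left-boundary test
-- (alternative decomposition, same cost); return value only, no mutation.

-- ===== PORT A =====
-- A's loop: state (streak, total); made = possession.get("paint_touch") and (possession.get("points") or 0) > 0
def count_paint_touch_three_make_streaks (possessions : List (List (String × Int))) : Int :=
  (possessions.foldl
    (fun (st : Int × Int) (possession : List (String × Int)) =>
      let made : Bool :=
        (match PySem.Dict.get? (PySem.Dict.mk possession) "paint_touch" with
          | none => false
          | some v => v != 0)
        && decide ((0 : Int) < PySem.Dict.getD (PySem.Dict.mk possession) "points" 0)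
      if made then
        let streak := st.1 + 1
        if streak == 3 then (streak, st.2 + 1) else (streak, st.2)  -- elif streak > 3: continue (total unchanged)
      else (0, st.2))
    (0, 0)).2

-- ===== PORT B =====
-- Source B's qualifying boolean: bool(p.get("paint_touch") and (p.get("points") or 0) > 0)
def pvQualifies (p : List (String × Int)) : Bool :=
  (match PySem.Dict.get? (PySem.Dict.mk p) "paint_touch" with
    | none => false
    | some v => v != 0)
  && decide ((0 : Int) < PySem.Dict.getD (PySem.Dict.mk p) "points" 0)

-- range(len(q) - 2): Nat subtraction gives the same empty range Python's
-- negative bound does; q[i] → getD (every accessed index is in range: the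
-- i-1 access is short-circuited away at i = 0 exactly as in Python's `or`).
def count_paint_touch_three_make_streaks_alt (possessions : List (List (String × Int))) : Int :=
  let q := possessions.map pvQualifies
  (((List.range (q.length - 2)).countP (fun i =>
      q.getD i false && q.getD (i + 1) false && q.getD (i + 2) false &&
      (decide (i = 0) || !(q.getD (i - 1) false)))) : Nat)

-- ===== PRECONDITION & SPEC =====
def Spec_count_paint_touch_three_make_streaks (possessions : List (List (String × Int))) (out : Int) : Prop := out = count_paint_touch_three_make_streaks_alt possessions
instance (possessions : List (List (String × Int))) (out : Int) : Decidable (Spec_count_paint_touch_three_make_streaks possessions out) := by unfold Spec_count_paint_touch_three_make_streaks; infer_instance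

-- ===== CLAIM (what is proved, stated in full; the proofs are below) =====
def Claim_equal_count_paint_touch_three_make_streaks : Prop := ∀ (possessions : List (List (String × Int))), Dom_count_paint_touch_three_make_streaks possessions → Spec_count_paint_touch_three_make_streaks possessions (count_paint_touch_three_make_streaks possessions)

-- ===== LEMMAS AND PROOFS =====

-- A's loop step, abstracted over the boolean sequence
def pvStepA (st : Int × Int) (b : Bool) : Int × Int :=
  if b then
    let streak := st.1 + 1
    if streak == 3 then (streak, st.2 + 1) else (streak, st.2)
  else (0, st.2)

-- total added by the rest of A's loop, given current streak s
def pvG (s : Int) : List Bool → Int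
  | [] => 0
  | b :: bs => if b then (if s + 1 == 3 then (1 : Int) else 0) + pvG (s + 1) bs else pvG 0 bs

theorem pvFoldA (bs : List Bool) : ∀ (s t : Int),
    (bs.foldl pvStepA (s, t)).2 = t + pvG s bs := by
  induction bs with
  | nil => intro s t; simp [pvG]
  | cons b bs ih =>
    intro s t
    cases b with
    | false => simp [pvStepA, pvG, ih]
    | true =>
      simp only [List.foldl_cons, pvStepA, pvG, if_true]
      by_cases h : s + 1 == 3 <;> simp [h, ih] <;> try ring

-- recursive form of B's run-start count, generalized over the (qualifying?)
-- value of the element just before bs; prev = false at the top level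
def pvV (prev : Bool) : List Bool → Nat
  | [] => 0
  | b :: t => (if b && t.getD 0 false && t.getD 1 false && !prev then 1 else 0) + pvV b t

-- B's countP-over-range form, generalized the same way
def pvC (prev : Bool) (bs : List Bool) : Nat :=
  (List.range (bs.length - 2)).countP (fun i =>
    bs.getD i false && bs.getD (i + 1) false && bs.getD (i + 2) false &&
    (if i = 0 then !prev else !(bs.getD (i - 1) false)))

theorem pvC_eq_pvV (bs : List Bool) : ∀ (prev : Bool), pvC prev bs = pvV prev bs := by
  induction bs with
  | nil => intro prev; simp [pvC, pvV]
  | cons b t ih =>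
    intro prev
    rcases t with _ | ⟨x, _ | ⟨y, t⟩⟩
    · simp [pvC, pvV]
    · simp [pvC, pvV]
    · show pvC prev (b :: x :: y :: t)
        = (if b && (x :: y :: t).getD 0 false && (x :: y :: t).getD 1 false && !prev then 1 else 0)
          + pvV b (x :: y :: t)
      rw [← ih b]
      unfold pvC
      have hlen : (b :: x :: y :: t).length - 2 = ((x :: y :: t).length - 2) + 1 := by
        simp
      rw [hlen, List.range_succ_eq_map, List.countP_cons, List.countP_map]
      have hcong : ((List.range ((x :: y :: t).length - 2)).countP
          ((fun j => (b :: x :: y :: t).getD j false && (b :: x :: y :: t).getD (j + 1) false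
              && (b :: x :: y :: t).getD (j + 2) false
              && (if j = 0 then !prev else !((b :: x :: y :: t).getD (j - 1) false))) ∘ (· + 1)))
          = (List.range ((x :: y :: t).length - 2)).countP
              (fun i => (x :: y :: t).getD i false && (x :: y :: t).getD (i + 1) false
                && (x :: y :: t).getD (i + 2) false
                && (if i = 0 then !b else !((x :: y :: t).getD (i - 1) false))) := by
        apply List.countP_congr
        intro i _
        cases i with
        | zero => simp
        | succ j => simp
      rw [hcong]
      simp [Nat.add_comm]

-- guard expressions used to relate pvG's streak state to pvV's boundary state
def pvT1 (bs : List Bool) : Int := if bs.getD 0 false then 1 else 0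
def pvT2 (bs : List Bool) : Int := if bs.getD 0 false && bs.getD 1 false then 1 else 0

theorem pvG_pvV (bs : List Bool) :
    pvG 0 bs = (pvV false bs : Int)
    ∧ pvG 1 bs = (pvV true bs : Int) + pvT2 bs
    ∧ pvG 2 bs = (pvV true bs : Int) + pvT1 bs
    ∧ ∀ s : Int, 3 ≤ s → pvG s bs = (pvV true bs : Int) := by
  induction bs with
  | nil =>
    refine ⟨?_, ?_, ?_, fun s hs => ?_⟩ <;> simp [pvG, pvV, pvT1, pvT2]
  | cons b t ih =>
    obtain ⟨ih0, ih1, ih2, ih3⟩ := ih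
    refine ⟨?_, ?_, ?_, fun s hs => ?_⟩
    · cases b with
      | false => simpa [pvG, pvV] using ih0
      | true =>
        rcases h0 : (t[0]?.getD false) <;> rcases h1 : (t[1]?.getD false) <;>
          simp [pvG, pvV, pvT2, h0, h1, ih1] <;> omega
    · cases b with
      | false => simpa [pvG, pvV, pvT2] using ih0
      | true =>
        rcases h0 : (t[0]?.getD false) <;>
          simp [pvG, pvV, pvT1, pvT2, h0, ih2]
    · cases b with
      | false => simpa [pvG, pvV, pvT1] using ih0
      | true =>
        simp [pvG, pvV, pvT1, ih3 3 (by norm_num)]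
        omega
    · cases b with
      | false => simpa [pvG, pvV] using ih0
      | true =>
        have hcs : (s + 1 == 3) = false := by
          simp only [beq_eq_false_iff_ne, ne_eq]; omega
        simp [pvG, pvV, hcs, ih3 (s + 1) (by omega)]

-- B's port's predicate (decide (i = 0) || !getD (i-1)) is pvC's with prev = false
theorem pvAlt_eq_pvC (q : List Bool) :
    ((List.range (q.length - 2)).countP (fun i =>
      q.getD i false && q.getD (i + 1) false && q.getD (i + 2) false &&
      (decide (i = 0) || !(q.getD (i - 1) false)))) = pvC false q := by
  unfold pvC
  apply List.countP_congr
  intro i _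
  by_cases h : i = 0 <;> simp [h]

-- ===== VERDICT (by name: the statement is the Claim_ definition above) =====
theorem count_paint_touch_three_make_streaks_spec : Claim_equal_count_paint_touch_three_make_streaks := by
  intro possessions _
  unfold Spec_count_paint_touch_three_make_streaks
  unfold count_paint_touch_three_make_streaks
  simp only [count_paint_touch_three_make_streaks_alt]
  have h : (possessions.foldl
      (fun (st : Int × Int) (possession : List (String × Int)) =>
        let made : Bool :=
          (match PySem.Dict.get? (PySem.Dict.mk possession) "paint_touch" with
            | none => false
            | some v => v != 0)
          && decide ((0 : Int) < PySem.Dict.getD (PySem.Dict.mk possession) "points" 0)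
        if made then
          let streak := st.1 + 1
          if streak == 3 then (streak, st.2 + 1) else (streak, st.2)
        else (0, st.2)) (0, 0))
      = (possessions.map pvQualifies).foldl pvStepA (0, 0) := by
    rw [List.foldl_map]
    rfl
  rw [h, pvFoldA, pvAlt_eq_pvC, pvC_eq_pvV, (pvG_pvV (possessions.map pvQualifies)).1]
  ring
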